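-- pv_equiv track=rewrite | github.com/binnev/pygame_sandbox | base/utils.py | count_edges
-- ===== SOURCE A (Python) =====
-- def count_edges(values):
--     rising_edges = 0
--     falling_edges = 0
--     for ii, value in enumerate(values):
--         if ii == 0:
--             previous_value = value
--         if value and not previous_value:
--             rising_edges += 1
--         if not value and previous_value:
--             falling_edges += 1
--         previous_value = value
--     return rising_edges, falling_edges
-- ===== SOURCE B (Python) =====
-- def count_edges(values):
--     # Compress to a run-length list of truth values (one entry per maximal
--     # run of equal-truthiness elements), then count edges off that list:
--     # every group after the first is an edge; the True ones are rising.
--     groups = []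
--     for v in values:
--         b = bool(v)
--         if not groups or groups[-1] != b:
--             groups.append(b)
--     tail = groups[1:]
--     rising = sum(tail)
--     falling = len(tail) - rising
--     return rising, falling
-- ===== Notes on version B (the rewrite author's own statement) =====
-- stated objective: alternative
-- what changed: B first run-length-compresses the sequence into a list of group truth values (one per maximal run) and then derives both counts from that list (each group after the first is one edge, the True ones rising), instead of A's single stateful pass counting transitions with previous_value and an ii==0 special case.
import Mathlib
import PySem

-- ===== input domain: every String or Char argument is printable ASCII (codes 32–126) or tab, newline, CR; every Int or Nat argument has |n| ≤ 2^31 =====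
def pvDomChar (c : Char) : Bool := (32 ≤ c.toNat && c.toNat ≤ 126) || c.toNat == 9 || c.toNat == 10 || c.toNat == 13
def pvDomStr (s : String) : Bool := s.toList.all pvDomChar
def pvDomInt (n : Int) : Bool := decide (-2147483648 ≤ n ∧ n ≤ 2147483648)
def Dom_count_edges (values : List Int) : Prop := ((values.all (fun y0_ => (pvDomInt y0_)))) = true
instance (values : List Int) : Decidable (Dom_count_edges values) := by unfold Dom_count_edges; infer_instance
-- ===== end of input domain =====

-- B run-length-compresses the sequence into a list of group truth values and reads
-- both edge counts off that list, instead of A's stateful transition-counting pass;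
-- same O(n) cost, different decomposition (build run list, then count).

-- ===== PORT A =====
-- one loop iteration: state (rising, falling, previous_value); previous_value starts
-- as a junk 0 that the ii == 0 branch always overwrites before first use, as in Python.
def countEdgesStep (st : Int × Int × Int) (iv : Int × Int) : Int × Int × Int :=
  let p1 := if iv.1 = 0 then iv.2 else st.2.2
  ((if iv.2 ≠ 0 ∧ p1 = 0 then st.1 + 1 else st.1),
   (if iv.2 = 0 ∧ p1 ≠ 0 then st.2.1 + 1 else st.2.1),
   iv.2)

def count_edges (values : List Int) : Int × Int :=
  let st := (PySem.List.enumerate values 0).foldl countEdgesStep (0, 0, 0)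
  (st.1, st.2.1)

-- ===== PORT B =====
-- loop body: append bool(v) to the run list unless it repeats the last group
def bstep (gs : List Bool) (v : Int) : List Bool :=
  let b := v != 0
  if gs.getLast? ≠ some b then gs ++ [b] else gs

def count_edges_alt (values : List Int) : Int × Int :=
  let groups := values.foldl bstep []
  let tail := groups.drop 1                    -- groups[1:]
  let rising : Int := (tail.countP id : Nat)   -- sum(tail)
  (rising, (tail.length : Int) - rising)

-- ===== PRECONDITION & SPEC =====
def Spec_count_edges (values : List Int) (out : Int × Int) : Prop := out = count_edges_alt values
instance (values : List Int) (out : Int × Int) : Decidable (Spec_count_edges values out) := by unfold Spec_count_edges; infer_instance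

-- ===== CLAIM (what is proved, stated in full; the proofs are below) =====
def Claim_equal_count_edges : Prop := ∀ (values : List Int), Dom_count_edges values → Spec_count_edges values (count_edges values)

-- ===== LEMMAS AND PROOFS =====

-- reference edge counts of a list given the truth value of the previous element
def edges (b : Bool) : List Int → Int × Int
  | [] => (0, 0)
  | v :: l =>
    let c := v != 0
    let e := edges c l
    (e.1 + (if c && !b then 1 else 0), e.2 + (if !c && b then 1 else 0))

-- the groups B appends after a run list ending in truth value b
def tailruns (b : Bool) : List Int → List Bool
  | [] => []
  | v :: l =>
    let c := v != 0
    if c = b then tailruns b l else c :: tailruns c l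

theorem foldl_bstep (l : List Int) : ∀ (gs : List Bool) (b : Bool),
    gs.getLast? = some b → l.foldl bstep gs = gs ++ tailruns b l := by
  induction l with
  | nil => intro gs b _; simp [tailruns]
  | cons v l ih =>
    intro gs b hlast
    by_cases hc : (v != 0) = b
    · have : bstep gs v = gs := by simp [bstep, hc, hlast]
      rw [List.foldl_cons, this, ih gs b hlast]
      simp [tailruns, hc]
    · have hb : bstep gs v = gs ++ [v != 0] := by
        simp only [bstep]
        rw [if_pos (by simp only [hlast, ne_eq, Option.some.injEq]
                       exact fun h => hc h.symm)]
      rw [List.foldl_cons, hb, ih (gs ++ [v != 0]) (v != 0) (by simp)]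
      simp [tailruns, hc]
  
theorem tailruns_counts (l : List Int) : ∀ (b : Bool),
    (((tailruns b l).countP id : Nat) : Int) = (edges b l).1 ∧
    (((tailruns b l).length : Nat) : Int) = (edges b l).1 + (edges b l).2 := by
  induction l with
  | nil => intro b; simp [tailruns, edges]
  | cons v l ih =>
    intro b
    by_cases hc : (v != 0) = b
    · have := ih b
      simp only [tailruns, edges, hc, if_pos rfl]
      constructor
      · simpa [hc] using this.1
      · have h2 := this.2
        simp [hc] at h2 ⊢
        omega
    · have := ih (v != 0)
      simp only [tailruns, edges, hc, if_neg hc, List.countP_cons, List.length_cons]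
      cases hv : (v != 0) <;> cases hb : b <;> simp [hv, hb] at hc ⊢ <;>
        · rw [hv] at this
          push_cast
          omega
  
theorem countEdges_loop (rest : List Int) : ∀ (s : Int), 1 ≤ s → ∀ (r f p : Int),
    (PySem.List.enumerate rest s).foldl countEdgesStep (r, f, p)
      = (r + (edges (p != 0) rest).1, f + (edges (p != 0) rest).2, rest.getLastD p) := by
  induction rest with
  | nil => intro s hs r f p; simp [PySem.List.enumerate_nil, edges]
  | cons v rest ih =>
    intro s hs r f p
    have hs0 : ¬ (s = 0) := by omega
    rw [PySem.List.enumerate_cons, List.foldl_cons]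
    simp only [countEdgesStep, hs0, if_false]
    rw [ih (s + 1) (by omega)]
    simp only [edges, List.getLastD_cons]
    refine Prod.ext ?_ (Prod.ext ?_ rfl)
    · by_cases hv : v = 0 <;> by_cases hp : p = 0 <;>
        simp [hv, hp] <;> push_cast <;> ring
    · by_cases hv : v = 0 <;> by_cases hp : p = 0 <;>
        simp [hv, hp] <;> push_cast <;> ring

-- ===== VERDICT (by name: the statement is the Claim_ definition above) =====
theorem count_edges_spec : Claim_equal_count_edges := by
  intro values _
  unfold Spec_count_edges
  cases values with
  | nil => decide
  | cons v rest =>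
    show count_edges (v :: rest) = count_edges_alt (v :: rest)
    unfold count_edges count_edges_alt
    rw [PySem.List.enumerate_cons, List.foldl_cons]
    have hstep : countEdgesStep (0, 0, 0) ((0 : Int), v) = (0, 0, v) := by
      simp [countEdgesStep]
    have hb : bstep [] v = [v != 0] := by simp [bstep]
    rw [hstep, countEdges_loop rest (0+1) (by omega), List.foldl_cons, hb,
      foldl_bstep rest [v != 0] (v != 0) (by simp)]
    have hc := tailruns_counts rest (v != 0)
    simp only [List.singleton_append, List.drop_succ_cons, List.drop_zero]
    rw [hc.1]
    refine Prod.ext (by simp) ?_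
    simp only
    rw [hc.2]
    ring
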